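-- pv_equiv track=rewrite | github.com/louisgundelwein/smpl_agent | src/context.py | _find_safe_cut
-- ===== SOURCE A (Python) =====
-- from typing import Any
--
-- def _find_safe_cut(messages: list[dict[str, Any]]) -> int:
--     """Find the last safe cut point in the message list.
--
--     A safe cut point is after a complete turn (not in the middle
--     of an assistant-tool_calls + tool-responses block).
--     """
--     safe = 0
--     i = 0
--     while i < len(messages):
--         msg = messages[i]
--         role = msg.get("role")
--
--         if role == "assistant" and msg.get("tool_calls"):
--             # Skip past the assistant + all following tool responses
--             i += 1
--             while i < len(messages) and messages[i].get("role") == "tool":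
--                 i += 1
--             safe = i
--         else:
--             i += 1
--             safe = i
--
--     return safe
-- ===== SOURCE B (Python) =====
-- def _find_safe_cut(messages: list[dict[str, object]]) -> int:
--     """Find the last safe cut point in the message list.
--
--     Every iteration of the original scan sets `safe` to the new index,
--     so the last safe cut is always the end of the list.
--     """
--     return len(messages)
-- ===== Notes on version B (the rewrite author's own statement) =====
-- stated objective: simpler
-- what changed: Replaced the index-walking scan (with its assistant+tool-block skipping) by the closed form len(messages): every branch of A overwrites safe with the advanced index, so A always returns the list length.
import Mathlib
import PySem

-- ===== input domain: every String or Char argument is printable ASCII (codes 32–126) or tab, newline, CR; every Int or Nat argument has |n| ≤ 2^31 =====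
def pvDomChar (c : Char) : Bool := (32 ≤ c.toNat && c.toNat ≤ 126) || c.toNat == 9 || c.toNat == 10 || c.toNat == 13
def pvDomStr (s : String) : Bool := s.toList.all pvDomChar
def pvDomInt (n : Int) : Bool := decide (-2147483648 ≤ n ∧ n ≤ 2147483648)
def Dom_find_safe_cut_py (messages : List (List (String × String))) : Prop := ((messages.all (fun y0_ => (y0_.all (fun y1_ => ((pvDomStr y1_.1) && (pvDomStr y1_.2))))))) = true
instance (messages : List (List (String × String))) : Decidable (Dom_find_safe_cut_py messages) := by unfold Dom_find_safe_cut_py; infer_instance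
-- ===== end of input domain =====

-- B replaces A's index-walking scan by the closed form `len(messages)`:
-- every branch of A's loop overwrites `safe` with the advanced index, so the scan is redundant.

-- ===== PORT A =====
-- msg.get("tool_calls") truthiness: under the dict[str,str] convention a present value is truthy iff non-empty.
def pvTruthy (o : Option String) : Bool :=
  match o with
  | some s => !(s == "")
  | none => false

-- inner `while i < len(messages) and messages[i].get("role") == "tool": i += 1`
def pvSkipTools (messages : List (List (String × String))) (i : Nat) : Nat :=
  if i < messages.length ∧ (PySem.Dict.mk (messages.getD i [])).get? "role" = some "tool" then
    pvSkipTools messages (i + 1)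
  else i
termination_by messages.length - i
decreasing_by omega

theorem pvSkipTools_ge (messages : List (List (String × String))) (i : Nat) :
    i ≤ pvSkipTools messages i := by
  fun_induction pvSkipTools messages i with
  | case1 i h ih => omega
  | case2 i h => omega

-- outer `while i < len(messages): …` with state (i, safe)
def pvOuter (messages : List (List (String × String))) (i safe : Nat) : Nat :=
  if i < messages.length then
    let msg := messages.getD i []
    let role := (PySem.Dict.mk msg).get? "role"
    if role = some "assistant" ∧ pvTruthy ((PySem.Dict.mk msg).get? "tool_calls") then
      let j := pvSkipTools messages (i + 1)
      pvOuter messages j j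
    else
      pvOuter messages (i + 1) (i + 1)
  else safe
termination_by messages.length - i
decreasing_by
  · have := pvSkipTools_ge messages (i + 1); omega
  · omega

def find_safe_cut_py (messages : List (List (String × String))) : Int :=
  (pvOuter messages 0 0 : Int)

-- ===== PORT B =====
def find_safe_cut_py_alt (messages : List (List (String × String))) : Int :=
  (messages.length : Int)

-- ===== PRECONDITION & SPEC =====
def Spec_find_safe_cut_py (messages : List (List (String × String))) (out : Int) : Prop := out = find_safe_cut_py_alt messages
instance (messages : List (List (String × String))) (out : Int) : Decidable (Spec_find_safe_cut_py messages out) := by unfold Spec_find_safe_cut_py; infer_instance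

-- ===== CLAIM (what is proved, stated in full; the proofs are below) =====
def Claim_equal_find_safe_cut_py : Prop := ∀ (messages : List (List (String × String))), Dom_find_safe_cut_py messages → Spec_find_safe_cut_py messages (find_safe_cut_py messages)

-- ===== LEMMAS AND PROOFS =====

theorem pvSkipTools_le (messages : List (List (String × String))) (i : Nat)
    (h : i ≤ messages.length) : pvSkipTools messages i ≤ messages.length := by
  fun_induction pvSkipTools messages i with
  | case1 i hc ih => exact ih (by omega)
  | case2 i hc => exact h

-- Loop invariant: started at i ≤ len, the outer loop returns len when i < len, else `safe`.
theorem pvOuter_eq (messages : List (List (String × String))) (i safe : Nat)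
    (h : i ≤ messages.length) :
    pvOuter messages i safe = if i < messages.length then messages.length else safe := by
  fun_induction pvOuter messages i safe with
  | case1 i safe hlt msg role hc j ih =>
    have hj1 : i + 1 ≤ pvSkipTools messages (i + 1) := pvSkipTools_ge messages (i + 1)
    have hjle : pvSkipTools messages (i + 1) ≤ messages.length :=
      pvSkipTools_le messages (i + 1) (by omega)
    rw [ih hjle]
    simp only [hlt, if_pos]
    split <;> omega
  | case2 i safe hlt msg role hc ih =>
    rw [ih (by omega)]
    simp only [hlt, if_pos]
    split <;> omega
  | case3 i safe hlt =>
    simp [hlt]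

theorem find_safe_cut_py_len (messages : List (List (String × String))) :
    find_safe_cut_py messages = (messages.length : Int) := by
  unfold find_safe_cut_py
  rw [pvOuter_eq messages 0 0 (Nat.zero_le _)]
  split <;> omega

-- ===== VERDICT (by name: the statement is the Claim_ definition above) =====
theorem find_safe_cut_py_spec : Claim_equal_find_safe_cut_py := by
  intro messages _
  unfold Spec_find_safe_cut_py find_safe_cut_py_alt
  exact find_safe_cut_py_len messages
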